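-- pv_equiv track=rewrite | github.com/LitRidl/checker-content | contlab12/27/solution.py | f
-- ===== SOURCE A (Python) =====
-- def f(w):
--     sign = ''
--     if w[0] in '+-':
--         sign = '-' if w[0] == '-' and w[1:] != '0' else ''
--         w = w[1:]
--     if len(w) < 2:
--         return sign + w
--     w = w[::-1]
--     bi = zip(w[::2], w[1::2])
--     res = []
--     for x, y in bi:
--         res.append(x + y + str(abs(int(x) - int(y))))
--     return sign + (((w[-1] if len(w) % 2 else '') + ''.join(r[::-1] for r in res[::-1])).lstrip('0') or '0')
-- ===== SOURCE B (Python) =====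
-- def f(w):
--     sign = ''
--     if w[0] in '+-':
--         sign = '-' if w[0] == '-' and w[1:] != '0' else ''
--         w = w[1:]
--     if len(w) < 2:
--         return sign + w
--     # forward pass: optional leading digit for odd length, then pairs left-to-right
--     if len(w) % 2:
--         out, rest = w[0], w[1:]
--     else:
--         out, rest = '', w
--     for i in range(0, len(rest), 2):
--         a, b = rest[i], rest[i + 1]
--         out += str(abs(int(a) - int(b))) + a + b
--     return sign + (out.lstrip('0') or '0')
-- ===== Notes on version B (the rewrite author's own statement) =====
-- stated objective: simpler
-- what changed: B replaces A's reverse / even-odd slice zip / per-fragment reversal / reversed join round-trip with a single forward pass: an optional leading digit, then pairs taken left-to-right with the fragment built directly in output order.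
import Mathlib
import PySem

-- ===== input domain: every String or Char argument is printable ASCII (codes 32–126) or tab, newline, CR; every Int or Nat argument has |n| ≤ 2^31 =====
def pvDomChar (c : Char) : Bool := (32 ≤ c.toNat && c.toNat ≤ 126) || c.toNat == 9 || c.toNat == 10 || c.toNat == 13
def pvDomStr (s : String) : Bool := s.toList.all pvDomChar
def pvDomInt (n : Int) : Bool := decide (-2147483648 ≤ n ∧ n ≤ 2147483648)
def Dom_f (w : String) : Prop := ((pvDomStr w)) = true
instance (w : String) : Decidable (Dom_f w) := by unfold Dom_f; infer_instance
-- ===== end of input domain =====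

-- B does the same digit-pair transformation in one forward pass instead of A's
-- reverse / slice-zip / re-reverse round-trip; equal on every input A returns on.

-- ===== PORT A =====
-- int(x) for the one-char strings A feeds to int(); ValueError is excluded by Pre_f
def digitA (c : Char) : Int := (PySem.Int.ofChars? [c]).getD 0

-- the loop 'for x, y in bi: res.append(x + y + str(abs(int(x) - int(y))))'
def resA (bi : List (Char × Char)) : List (List Char) :=
  bi.foldl (fun acc p => acc ++ [[p.1, p.2] ++ PySem.Int.toChars |digitA p.1 - digitA p.2|]) []

-- the big return expression of A, for the already-reversed w (r = w[::-1], cf. slice?_none_none_neg_one):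
-- (w[-1] if len(w) % 2 else '') + ''.join(r[::-1] for r in res[::-1])  with  bi = zip(w[::2], w[1::2])
def midA (u : List Char) : List Char :=
  (if u.reverse.length % 2 ≠ 0 then [PySem.List.pyGetD u.reverse (-1) ' '] else [])
  ++ ((resA (((PySem.List.slice? u.reverse none none 2).getD []).zip
             ((PySem.List.slice? u.reverse (some 1) none 2).getD []))).reverse.map List.reverse).flatten

-- A's body after the sign has been handled; .lstrip('0') ported by hand as dropWhile (exact),
-- 'x or "0"' as the empty test
def fCore (sign u : List Char) : List Char :=
  if u.length < 2 then sign ++ u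
  else sign ++ (if (midA u).dropWhile (· == '0') = [] then ['0']
                else (midA u).dropWhile (· == '0'))

def f (w : String) : String :=
  let cs := w.toList
  let c0 := PySem.List.pyGetD cs 0 ' '   -- w[0]; IndexError on '' excluded by Pre_f
  if c0 = '+' ∨ c0 = '-' then
    String.ofList (fCore (if c0 = '-' ∧ cs.tail ≠ ['0'] then ['-'] else []) cs.tail)
  else
    String.ofList (fCore [] cs)

-- ===== PORT B =====
def digitB (c : Char) : Int := (PySem.Int.ofChars? [c]).getD 0

-- the forward loop over rest, two characters at a time
def pairsB : List Char → List Char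
  | a :: b :: rest => PySem.Int.toChars |digitB a - digitB b| ++ [a, b] ++ pairsB rest
  | _ => []

-- B's body after the sign has been handled: optional leading digit, then the pairs
def fAltCore (sign u : List Char) : List Char :=
  if u.length < 2 then sign ++ u
  else
    ((fun body => sign ++ (if body.dropWhile (· == '0') = [] then ['0']
                           else body.dropWhile (· == '0')))
      ((if u.length % 2 = 1 then u.take 1 else [])
        ++ pairsB (if u.length % 2 = 1 then u.tail else u)))

def f_alt (w : String) : String :=
  let cs := w.toList
  let c0 := PySem.List.pyGetD cs 0 ' '
  if c0 = '+' ∨ c0 = '-' then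
    String.ofList (fAltCore (if c0 = '-' ∧ cs.tail ≠ ['0'] then ['-'] else []) cs.tail)
  else
    String.ofList (fAltCore [] cs)

-- ===== PRECONDITION & SPEC =====
-- Pre_f excludes exactly the inputs where A raises: the empty string (IndexError on w[0])
-- and strings whose paired part (after the optional sign, when the remainder has length ≥ 2)
-- contains a non-digit character (ValueError from int()).
def Pre_f (w : String) : Prop :=
  w.toList ≠ [] ∧
  ((if PySem.List.pyGetD w.toList 0 ' ' = '+' ∨ PySem.List.pyGetD w.toList 0 ' ' = '-'
      then w.toList.tail else w.toList).length < 2 ∨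
   ((if (if PySem.List.pyGetD w.toList 0 ' ' = '+' ∨ PySem.List.pyGetD w.toList 0 ' ' = '-'
            then w.toList.tail else w.toList).length % 2 = 1
      then (if PySem.List.pyGetD w.toList 0 ' ' = '+' ∨ PySem.List.pyGetD w.toList 0 ' ' = '-'
             then w.toList.tail else w.toList).tail
      else (if PySem.List.pyGetD w.toList 0 ' ' = '+' ∨ PySem.List.pyGetD w.toList 0 ' ' = '-'
             then w.toList.tail else w.toList)).all PySem.Chars.isdigit = true))
instance (w : String) : Decidable (Pre_f w) := by unfold Pre_f; infer_instance

def pvWitness_f : String := "12"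

def Spec_f (w : String) (out : String) : Prop := out = f_alt w
instance (w : String) (out : String) : Decidable (Spec_f w out) := by unfold Spec_f; infer_instance

-- ===== CLAIM (what is proved, stated in full; the proofs are below) =====
def Claim_equal_f : Prop := ∀ (w : String), Dom_f w → Pre_f w → Spec_f w (f w)

-- ===== LEMMAS AND PROOFS =====

-- characters at even positions (what w[::2] selects)
def evensL : List Char → List Char
  | a :: _ :: t => a :: evensL t
  | [a] => [a]
  | [] => []

theorem filterMap_evens : ∀ (xs : List Char),
    List.filterMap (fun k => xs[2*k]?) (List.range ((xs.length+1)/2)) = evensL xs := by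
  intro xs
  induction xs using evensL.induct with
  | case1 a b t ih =>
    have hl : ((a :: b :: t).length + 1) / 2 = (t.length + 1) / 2 + 1 := by
      simp [List.length_cons]; omega
    rw [hl, List.range_succ_eq_map, List.filterMap_cons, List.filterMap_map]
    simp only [Nat.mul_zero, List.getElem?_cons_zero]
    have : (fun k => (a :: b :: t)[2*k]?) ∘ (fun n => n + 1) = fun k => t[2*k]? := by
      funext k
      simp only [Function.comp]
      have : 2 * (k + 1) = 2 * k + 1 + 1 := by omega
      rw [this, List.getElem?_cons_succ, List.getElem?_cons_succ]
    rw [this, ih]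
    rfl
  | case2 a => simp [evensL]
  | case3 => rfl

theorem slice_evens (xs : List Char) :
    (PySem.List.slice? xs none none 2).getD [] = evensL xs := by
  rw [← filterMap_evens xs]
  simp only [PySem.List.slice?, PySem.List.sliceIndices]
  norm_num
  rcases Nat.eq_zero_or_pos xs.length with h0 | h0
  · have : xs = [] := List.eq_nil_of_length_eq_zero h0
    subst this; rfl
  · rw [if_pos (by exact_mod_cast h0)]
    congr 1
    congr 1
    omega

theorem slice_odds (xs : List Char) (h : 1 ≤ xs.length) :
    (PySem.List.slice? xs (some 1) none 2).getD [] = evensL xs.tail := by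
  rw [← filterMap_evens xs.tail]
  simp only [PySem.List.slice?, PySem.List.sliceIndices]
  norm_num
  rw [min_eq_left (by exact_mod_cast h)]
  have hfun : (fun k : ℕ => xs[(1 + 2 * (k:Int)).toNat]?) = fun k => xs[2 * k + 1]? := by
    funext k
    congr 1
    omega
  rw [hfun]
  congr 2
  rcases Nat.lt_or_ge 1 xs.length with h1 | h1
  · rw [if_pos (by exact_mod_cast h1)]
    omega
  · rw [if_neg (by omega)]
    omega

-- the pairs A forms on the reversed string
def pairsRev : List Char → List (Char × Char)
  | x :: y :: t => (x, y) :: pairsRev t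
  | _ => []

theorem zip_evens_odds : ∀ (xs : List Char),
    (evensL xs).zip (evensL xs.tail) = pairsRev xs := by
  intro xs
  match xs with
  | [] => rfl
  | [a] => rfl
  | a :: b :: t =>
    have ih := zip_evens_odds t
    cases t with
    | nil => rfl
    | cons c t' =>
      simp only [List.tail_cons] at ih
      simp only [evensL, List.zip_cons_cons, pairsRev, List.tail_cons]
      exact congrArg (List.cons (a, b)) ih

theorem pairsRev_append_two : ∀ (l : List Char), l.length % 2 = 0 → ∀ x y,
    pairsRev (l ++ [x, y]) = pairsRev l ++ [(x, y)]
  | [], _, _, _ => rfl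
  | [_], h, _, _ => by simp at h
  | a :: b :: t, h, x, y => by
    have h' : t.length % 2 = 0 := by simp only [List.length_cons] at h; omega
    have ih := pairsRev_append_two t h' x y
    simp only [List.cons_append, pairsRev, ih]

theorem pairsRev_append_one : ∀ (l : List Char), l.length % 2 = 0 → ∀ x,
    pairsRev (l ++ [x]) = pairsRev l
  | [], _, _ => rfl
  | [_], h, _ => by simp at h
  | a :: b :: t, h, x => by
    have h' : t.length % 2 = 0 := by simp only [List.length_cons] at h; omega
    have ih := pairsRev_append_one t h' x
    simp only [List.cons_append, pairsRev, ih]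

theorem char_of_digit (c : Char) (h : PySem.Chars.isdigit c = true) :
    c = '0' ∨ c = '1' ∨ c = '2' ∨ c = '3' ∨ c = '4' ∨ c = '5' ∨ c = '6' ∨ c = '7' ∨ c = '8' ∨ c = '9' := by
  simp only [PySem.Chars.isdigit, Bool.and_eq_true, decide_eq_true_eq] at h
  obtain ⟨a, b⟩ := h
  have ha : 48 ≤ c.toNat := a
  have hb : c.toNat ≤ 57 := b
  have hc := Char.ofNat_toNat c
  have : c.toNat = 48 ∨ c.toNat = 49 ∨ c.toNat = 50 ∨ c.toNat = 51 ∨ c.toNat = 52 ∨ c.toNat = 53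
      ∨ c.toNat = 54 ∨ c.toNat = 55 ∨ c.toNat = 56 ∨ c.toNat = 57 := by omega
  rcases this with h2|h2|h2|h2|h2|h2|h2|h2|h2|h2 <;> rw [h2] at hc <;> rw [← hc] <;> simp

theorem digitA_range (c : Char) (h : PySem.Chars.isdigit c = true) :
    0 ≤ digitA c ∧ digitA c ≤ 9 := by
  rcases char_of_digit c h with h|h|h|h|h|h|h|h|h|h <;> subst h <;> decide

theorem toChars_single (k : Int) (h0 : 0 ≤ k) (h9 : k ≤ 9) :
    (PySem.Int.toChars k).reverse = PySem.Int.toChars k := by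
  interval_cases k <;> decide

theorem resA_eq_map (bi : List (Char × Char)) :
    resA bi = bi.map (fun p => [p.1, p.2] ++ PySem.Int.toChars |digitA p.1 - digitA p.2|) := by
  unfold resA
  rw [PySem.List.foldl_append_singleton_eq_map]
  rfl

-- the body of A's join, over an even-length all-digit list, is exactly B's forward pass
theorem mid_even : ∀ (u : List Char), u.length % 2 = 0 →
    (∀ c ∈ u, PySem.Chars.isdigit c = true) →
    ((((pairsRev u.reverse).map
        (fun p => [p.1, p.2] ++ PySem.Int.toChars |digitA p.1 - digitA p.2|)).reverse.map
        List.reverse).flatten) = pairsB u := by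
  intro u
  match u with
  | [] => intro _ _; rfl
  | [a] => intro h _; simp at h
  | a :: b :: v =>
    intro hpar hdig
    have hvpar : v.length % 2 = 0 := by simp only [List.length_cons] at hpar; omega
    have ih := mid_even v hvpar (fun c hc => hdig c (by simp [hc]))
    have hrev : (a :: b :: v).reverse = v.reverse ++ [b, a] := by simp
    have hvrev : v.reverse.length % 2 = 0 := by simpa using hvpar
    rw [hrev, pairsRev_append_two v.reverse hvrev b a]
    rw [List.map_append, List.reverse_append, List.map_append, List.flatten_append]
    have hda := digitA_range a (hdig a (by simp))
    have hdb := digitA_range b (hdig b (by simp))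
    have habs : |digitA b - digitA a| = |digitA a - digitA b| := abs_sub_comm _ _
    have hr0 : (0:Int) ≤ |digitA a - digitA b| := abs_nonneg _
    have hr9 : |digitA a - digitA b| ≤ 9 := by rw [abs_le]; omega
    simp only [List.map_cons, List.map_nil, List.reverse_cons, List.reverse_nil,
      List.nil_append, List.flatten_cons, List.flatten_nil, List.append_nil]
    rw [List.reverse_append, habs, toChars_single _ hr0 hr9]
    rw [ih]
    show PySem.Int.toChars |digitA a - digitA b| ++ [b, a].reverse ++ pairsB v = _
    rfl

theorem head_take (u : List Char) (h : u ≠ []) : u.take 1 = [u.head h] := by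
  cases u with
  | nil => exact absurd rfl h
  | cons a t => rfl

theorem mid_eq_body (u : List Char) (h2 : 2 ≤ u.length)
    (hdig : ∀ c ∈ (if u.length % 2 = 1 then u.tail else u), PySem.Chars.isdigit c = true) :
    midA u = (if u.length % 2 = 1 then u.take 1 else [])
             ++ pairsB (if u.length % 2 = 1 then u.tail else u) := by
  unfold midA
  rw [slice_evens, slice_odds u.reverse (by simp; omega), zip_evens_odds, resA_eq_map,
      List.length_reverse]
  rcases Nat.even_or_odd u.length with he | ho
  · have hm : u.length % 2 = 0 := Nat.even_iff.mp he
    rw [if_neg (by omega), if_neg (by omega), if_neg (by omega), List.nil_append,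
        List.nil_append]
    rw [if_neg (by omega)] at hdig
    exact mid_even u hm hdig
  · have hm : u.length % 2 = 1 := Nat.odd_iff.mp ho
    have hne : u ≠ [] := by intro h; subst h; simp at h2
    have hrev : u.reverse = u.tail.reverse ++ [u.head hne] := by
      cases u with
      | nil => exact absurd rfl hne
      | cons x t => simp
    have htpar : u.tail.length % 2 = 0 := by simp only [List.length_tail]; omega
    rw [if_pos (by omega), if_pos hm, if_pos hm]
    rw [if_pos hm] at hdig
    rw [hrev, pairsRev_append_one u.tail.reverse (by simpa using htpar) (u.head hne),
        mid_even u.tail htpar hdig, PySem.List.pyGetD_neg_one_append_singleton,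
        head_take u hne]

theorem core_eq (sign u : List Char)
    (hd : u.length < 2 ∨
      (if u.length % 2 = 1 then u.tail else u).all PySem.Chars.isdigit = true) :
    fCore sign u = fAltCore sign u := by
  unfold fCore fAltCore
  by_cases hlen : u.length < 2
  · rw [if_pos hlen, if_pos hlen]
  · rw [if_neg hlen, if_neg hlen]
    rcases hd with h | h
    · exact absurd h hlen
    rw [mid_eq_body u (by omega) (List.all_eq_true.mp h)]

-- ===== VERDICT (by name: the statement is the Claim_ definition above) =====
theorem f_spec : Claim_equal_f := by
  intro w _ hpre
  unfold Spec_f f f_alt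
  obtain ⟨_, h2⟩ := hpre
  by_cases h : PySem.List.pyGetD w.toList 0 ' ' = '+' ∨ PySem.List.pyGetD w.toList 0 ' ' = '-' <;>
    simp only [h, if_true, if_false] <;>
    (rw [core_eq] ; simp only [h, if_true, if_false] at h2 ; exact h2)
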